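-- pv_equiv track=rewrite | github.com/OfirArviv/ud-reordering | experiments/scripts/dataset_creation/create_mtop_dataset.py | _get_sub_sentence_tokens_positions
-- ===== SOURCE A (Python) =====
-- from typing import List, Optional, Dict, Tuple, Union
--
-- def _getsubidx(lst: List, sublist: List) -> Optional[int]:
--     # This function return the index of the first occurrence of a sublist in a containing list
--     l1, l2 = len(lst), len(sublist)
--     for i in range(l1):
--         if lst[i:i + l2] == sublist:
--             return i
--
-- def _get_sub_sentence_tokens_positions(sentence: List, sub_sentence: List) -> List[int]:
--     allowed_splits_count = [2]
--     for split_count in allowed_splits_count: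
--         for i in range(1, len(sub_sentence)):
--             first_half = sub_sentence[:i]
--             second_half = sub_sentence[i:]
--             first_half_start = _getsubidx(sentence, first_half)
--             second_half_start = _getsubidx(sentence, second_half)
--
--             if first_half_start is not None and second_half_start is not None:
--                 first_half_indexes = list(range(first_half_start, first_half_start + len(sub_sentence[:i])))
--                 second_half_indexes = list(range(second_half_start, second_half_start + len(sub_sentence[i:])))
--
--                 return first_half_indexes + second_half_indexes
-- ===== SOURCE B (Python) =====
-- from typing import List, Optional
--
--
-- def _common_prefix_len(xs: List, ys: List) -> int:
--     k = 0
--     for a, b in zip(xs, ys):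
--         if a != b:
--             break
--         k += 1
--     return k
--
--
-- def _get_sub_sentence_tokens_positions(sentence: List, sub_sentence: List) -> List[int]:
--     n, m = len(sentence), len(sub_sentence)
--     # lcp[j]: length of the longest common prefix of sentence[j:] and sub_sentence
--     lcp = [_common_prefix_len(sentence[j:], sub_sentence) for j in range(n)]
--     # lcs[e]: length of the longest common suffix of sentence[:e] and sub_sentence
--     lcs = [_common_prefix_len(sentence[:e][::-1], sub_sentence[::-1]) for e in range(n + 1)]
--     for i in range(1, m):
--         t = m - i
--         fs = next((j for j in range(n) if lcp[j] >= i), None)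
--         ss = next((j for j in range(n) if j + t <= n and lcs[j + t] >= t), None)
--         if fs is not None and ss is not None:
--             return list(range(fs, fs + i)) + list(range(ss, ss + t))
--     return None
-- ===== Notes on version B (the rewrite author's own statement) =====
-- stated objective: faster
-- what changed: Instead of re-scanning the sentence with quadratic slice comparisons for every split point, B precomputes two match-length tables (longest common prefix/suffix of the sub-sentence at each sentence position) once, so each half's first-occurrence search becomes a length comparison per position.
import Mathlib
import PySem

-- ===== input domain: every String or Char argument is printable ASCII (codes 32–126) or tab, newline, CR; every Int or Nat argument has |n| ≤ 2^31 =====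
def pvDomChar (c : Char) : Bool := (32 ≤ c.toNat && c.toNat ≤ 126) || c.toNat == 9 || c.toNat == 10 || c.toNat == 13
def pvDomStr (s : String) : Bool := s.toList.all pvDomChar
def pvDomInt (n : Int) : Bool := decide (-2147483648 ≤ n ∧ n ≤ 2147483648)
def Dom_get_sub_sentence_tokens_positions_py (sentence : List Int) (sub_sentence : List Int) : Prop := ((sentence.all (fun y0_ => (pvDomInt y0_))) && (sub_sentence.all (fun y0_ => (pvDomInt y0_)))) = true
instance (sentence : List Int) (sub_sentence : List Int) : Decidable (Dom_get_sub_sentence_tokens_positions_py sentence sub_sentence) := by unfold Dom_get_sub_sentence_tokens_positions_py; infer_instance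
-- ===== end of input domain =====

-- B replaces A's per-split first-occurrence scans over list slices by two precomputed
-- match-length tables (longest common prefix/suffix of the sub-sentence at every position
-- of the sentence), so each half's occurrence test becomes a length comparison.

-- ===== PORT A =====
def getsubidx (lst : List Int) (sublist : List Int) : Option Int :=
  let l1 : Int := lst.length
  let l2 : Int := sublist.length
  (PySem.List.pyRange 0 l1 1).findSome? (fun i =>
    if PySem.List.slice lst (some i) (some (i + l2)) = sublist then some i else none)

def get_sub_sentence_tokens_positions_py (sentence : List Int) (sub_sentence : List Int) : Option (List Int) :=
  ([2] : List Int).findSome? (fun _split_count =>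
    (PySem.List.pyRange 1 (sub_sentence.length : Int) 1).findSome? (fun i =>
      let first_half := PySem.List.slice sub_sentence none (some i)
      let second_half := PySem.List.slice sub_sentence (some i) none
      let first_half_start := getsubidx sentence first_half
      let second_half_start := getsubidx sentence second_half
      match first_half_start, second_half_start with
      | some fhs, some shs =>
        some (PySem.List.pyRange fhs (fhs + ((PySem.List.slice sub_sentence none (some i)).length : Int)) 1
           ++ PySem.List.pyRange shs (shs + ((PySem.List.slice sub_sentence (some i) none).length : Int)) 1)
      | _, _ => none))

-- ===== PORT B =====
def common_prefix_len (xs : List Int) (ys : List Int) : Int :=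
  match xs, ys with
  | a :: xs, b :: ys => if a ≠ b then 0 else 1 + common_prefix_len xs ys
  | _, _ => 0

def get_sub_sentence_tokens_positions_py_alt (sentence : List Int) (sub_sentence : List Int) : Option (List Int) :=
  let n : Int := sentence.length
  let m : Int := sub_sentence.length
  let lcp : List Int := (PySem.List.pyRange 0 n 1).map
    (fun j => common_prefix_len (PySem.List.slice sentence (some j) none) sub_sentence)
  -- sentence[:e][::-1] and sub_sentence[::-1] are reversals (PySem.List.slice?_none_none_neg_one)
  let lcs : List Int := (PySem.List.pyRange 0 (n + 1) 1).map
    (fun e => common_prefix_len (PySem.List.slice sentence none (some e)).reverse sub_sentence.reverse)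
  (PySem.List.pyRange 1 m 1).findSome? (fun i =>
    let t := m - i
    let fs := (PySem.List.pyRange 0 n 1).findSome?
      (fun j => if i ≤ PySem.List.pyGetD lcp j 0 then some j else none)
    let ss := (PySem.List.pyRange 0 n 1).findSome?
      (fun j => if j + t ≤ n ∧ t ≤ PySem.List.pyGetD lcs (j + t) 0 then some j else none)
    match fs with
    | none => none
    | some a =>
      match ss with
      | none => none
      | some b =>
          some (PySem.List.pyRange a (a + i) 1 ++ PySem.List.pyRange b (b + t) 1))

-- ===== PRECONDITION & SPEC =====
def Spec_get_sub_sentence_tokens_positions_py (sentence : List Int) (sub_sentence : List Int) (out : Option (List Int)) : Prop := out = get_sub_sentence_tokens_positions_py_alt sentence sub_sentence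
instance (sentence : List Int) (sub_sentence : List Int) (out : Option (List Int)) : Decidable (Spec_get_sub_sentence_tokens_positions_py sentence sub_sentence out) := by unfold Spec_get_sub_sentence_tokens_positions_py; infer_instance

-- ===== CLAIM (what is proved, stated in full; the proofs are below) =====
def Claim_equal_get_sub_sentence_tokens_positions_py : Prop := ∀ (sentence : List Int) (sub_sentence : List Int), Dom_get_sub_sentence_tokens_positions_py sentence sub_sentence → Spec_get_sub_sentence_tokens_positions_py sentence sub_sentence (get_sub_sentence_tokens_positions_py sentence sub_sentence)

-- ===== LEMMAS AND PROOFS =====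

theorem findSome?_congr {α β : Type} {l : List α} {f g : α → Option β}
    (h : ∀ x ∈ l, f x = g x) : l.findSome? f = l.findSome? g := by
  induction l with
  | nil => rfl
  | cons a l ih =>
    simp only [List.findSome?_cons, h a (List.mem_cons_self ..)]
    cases g a with
    | some b => rfl
    | none => exact ih (fun x hx => h x (List.mem_cons_of_mem _ hx))

theorem common_prefix_len_nonneg (xs ys : List Int) : 0 ≤ common_prefix_len xs ys := by
  induction xs generalizing ys with
  | nil => simp [common_prefix_len]
  | cons a xs ih =>
    cases ys with
    | nil => simp [common_prefix_len]
    | cons b ys =>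
      simp only [common_prefix_len]
      split
      · omega
      · have := ih ys; omega

theorem common_prefix_len_ge_iff (xs ys : List Int) (k : Nat) (hk : k ≤ ys.length) :
    ((k : Int) ≤ common_prefix_len xs ys) ↔ xs.take k = ys.take k := by
  induction k generalizing xs ys with
  | zero => simpa using common_prefix_len_nonneg xs ys
  | succ k ih =>
    cases ys with
    | nil => simp at hk
    | cons b ys =>
      cases xs with
      | nil =>
        simp only [common_prefix_len, List.take_nil, List.take_succ_cons]
        constructor
        · intro h; omega
        · intro h; simp at h
      | cons a xs =>
        simp only [common_prefix_len, List.take_succ_cons, List.cons.injEq]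
        split
        · rename_i hne
          constructor
          · intro h; omega
          · rintro ⟨rfl, _⟩; exact absurd rfl hne
        · rename_i hne
          have heq : a = b := by by_contra h; exact hne h
          subst heq
          have hk' : k ≤ ys.length := by simpa using hk
          rw [← ih xs ys hk']
          constructor <;> intro h <;> [omega; (push_cast; omega)]

theorem match_shapes (x y : Option Int) (f : Int → Int → Option (List Int)) :
    (match x, y with | some a, some b => f a b | _, _ => none)
      = (match x with
         | none => none
         | some a => match y with | none => none | some b => f a b) := by
  cases x <;> cases y <;> rfl

theorem findSome?_singleton {α β : Type} (f : α → Option β) (a : α) :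
    [a].findSome? f = f a := by
  cases h : f a <;> simp [h]

theorem fs_eq (s sub : List Int) (k : Nat) (hk : k ≤ sub.length) :
    getsubidx s (sub.take k)
      = (PySem.List.pyRange 0 (s.length : Int) 1).findSome?
          (fun j => if (k : Int) ≤ PySem.List.pyGetD
              ((PySem.List.pyRange 0 (s.length : Int) 1).map
                (fun j => common_prefix_len (PySem.List.slice s (some j) none) sub)) j 0
            then some j else none) := by
  unfold getsubidx
  dsimp only
  apply findSome?_congr
  intro j hj
  rw [PySem.List.mem_pyRange_one] at hj
  obtain ⟨hj0, hjn⟩ := hj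
  obtain ⟨jn, rfl⟩ : ∃ jn : Nat, j = (jn : Int) := ⟨j.toNat, (Int.toNat_of_nonneg hj0).symm⟩
  have hjn' : jn < s.length := by exact_mod_cast hjn
  have hlen : (sub.take k).length = k := by simp [hk]
  rw [hlen, PySem.List.slice_natCast_add,
    PySem.List.pyGetD_map_pyRange _ s.length jn 0 hjn',
    PySem.List.slice_from_natCast]
  exact if_congr ((common_prefix_len_ge_iff (s.drop jn) sub k hk).symm) rfl rfl

theorem ss_eq (s sub : List Int) (k : Nat) (hk : k ≤ sub.length) (hk1 : 1 ≤ k) :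
    getsubidx s (sub.drop k)
      = (PySem.List.pyRange 0 (s.length : Int) 1).findSome?
          (fun j => if j + ((sub.length : Int) - (k : Int)) ≤ (s.length : Int) ∧
              (sub.length : Int) - (k : Int) ≤ PySem.List.pyGetD
                ((PySem.List.pyRange 0 ((s.length : Int) + 1) 1).map
                  (fun e => common_prefix_len (PySem.List.slice s none (some e)).reverse sub.reverse))
                (j + ((sub.length : Int) - (k : Int))) 0
            then some j else none) := by
  set t : Nat := sub.length - k with ht
  have hmk : (sub.length : Int) - (k : Int) = (t : Int) := by omega
  unfold getsubidx
  dsimp only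
  apply findSome?_congr
  intro j hj
  rw [PySem.List.mem_pyRange_one] at hj
  obtain ⟨hj0, hjn⟩ := hj
  obtain ⟨jn, rfl⟩ : ∃ jn : Nat, j = (jn : Int) := ⟨j.toNat, (Int.toNat_of_nonneg hj0).symm⟩
  have hjn' : jn < s.length := by exact_mod_cast hjn
  have hlen : (sub.drop k).length = t := by simp [ht]
  rw [hlen, PySem.List.slice_natCast_add, hmk]
  by_cases hc : jn + t ≤ s.length
  · have hcast : (jn : Int) + (t : Int) = ((jn + t : Nat) : Int) := by push_cast; ring
    have hn1 : ((s.length : Int) + 1) = ((s.length + 1 : Nat) : Int) := by push_cast; ring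
    rw [hcast, hn1, PySem.List.pyGetD_map_pyRange _ (s.length + 1) (jn + t) 0 (by omega),
      PySem.List.slice_to_natCast]
    have hiff : ((t : Int) ≤ common_prefix_len (s.take (jn + t)).reverse sub.reverse)
        ↔ List.take t (List.drop jn s) = sub.drop k := by
      rw [common_prefix_len_ge_iff _ _ t (by simp [ht])]
      rw [List.take_reverse, List.take_reverse]
      rw [List.length_take, Nat.min_eq_left hc]
      have h2 : jn + t - t = jn := by omega
      rw [h2, List.drop_take]
      have h3 : jn + t - jn = t := by omega
      have h4 : sub.length - t = k := by omega
      rw [h3, h4, List.reverse_inj]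
    refine if_congr ?_ rfl rfl
    constructor
    · intro hA
      exact ⟨by exact_mod_cast hc, hiff.mpr hA⟩
    · rintro ⟨_, h2⟩
      exact hiff.mp h2
  · refine if_congr ?_ rfl rfl
    constructor
    · intro hA
      have hlenA := congrArg List.length hA
      simp only [List.length_take, List.length_drop] at hlenA
      omega
    · rintro ⟨h1, _⟩
      exfalso
      apply hc
      have : (jn : Int) + (t : Int) ≤ (s.length : Int) := h1
      omega

-- ===== VERDICT (by name: the statement is the Claim_ definition above) =====
theorem get_sub_sentence_tokens_positions_py_spec : Claim_equal_get_sub_sentence_tokens_positions_py := by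
  intro s sub _dom
  show get_sub_sentence_tokens_positions_py s sub = get_sub_sentence_tokens_positions_py_alt s sub
  unfold get_sub_sentence_tokens_positions_py get_sub_sentence_tokens_positions_py_alt
  rw [findSome?_singleton]
  dsimp only
  apply findSome?_congr
  intro i hi
  rw [PySem.List.mem_pyRange_one] at hi
  obtain ⟨hi1, him⟩ := hi
  obtain ⟨k, rfl⟩ : ∃ k : Nat, i = (k : Int) := ⟨i.toNat, (Int.toNat_of_nonneg (by omega)).symm⟩
  have hk1 : 1 ≤ k := by exact_mod_cast hi1
  have hkm : k < sub.length := by exact_mod_cast him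
  rw [PySem.List.slice_to_natCast, PySem.List.slice_from_natCast,
      fs_eq s sub k (le_of_lt hkm), ss_eq s sub k (le_of_lt hkm) hk1]
  have hl1 : ((sub.take k).length : Int) = (k : Int) := by
    rw [List.length_take]; omega
  have hl2 : ((sub.drop k).length : Int) = (sub.length : Int) - (k : Int) := by
    rw [List.length_drop]; omega
  rw [hl1, hl2]
  exact match_shapes _ _ _
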